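-- pv_equiv track=rewrite | github.com/micchyboy237/jet_python_modules | jet/code/extraction/sentence_extraction.py | group_by_empty_split
-- ===== SOURCE A (Python) =====
-- from typing import List, Optional, Union
--
-- def group_by_empty_split(segments: List[str]) -> List[List[str]]:
--     paragraphs, current = [], []
--     for seg in segments:
--         if seg.strip():
--             current.append(seg)
--         else:
--             if current:
--                 paragraphs.append(current)
--                 current = []
--     if current:
--         paragraphs.append(current)
--     return paragraphs
-- ===== SOURCE B (Python) =====
-- from itertools import groupby
-- from typing import List
--
-- def group_by_empty_split(segments: List[str]) -> List[List[str]]: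
--     return [list(g) for nonblank, g in groupby(segments, key=lambda s: bool(s.strip())) if nonblank]
-- ===== Notes on version B (the rewrite author's own statement) =====
-- stated objective: idiomatic
-- what changed: Replaces the manual accumulator-and-flush loop by itertools.groupby on the blank/non-blank key, keeping only the non-blank runs.
import Mathlib
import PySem

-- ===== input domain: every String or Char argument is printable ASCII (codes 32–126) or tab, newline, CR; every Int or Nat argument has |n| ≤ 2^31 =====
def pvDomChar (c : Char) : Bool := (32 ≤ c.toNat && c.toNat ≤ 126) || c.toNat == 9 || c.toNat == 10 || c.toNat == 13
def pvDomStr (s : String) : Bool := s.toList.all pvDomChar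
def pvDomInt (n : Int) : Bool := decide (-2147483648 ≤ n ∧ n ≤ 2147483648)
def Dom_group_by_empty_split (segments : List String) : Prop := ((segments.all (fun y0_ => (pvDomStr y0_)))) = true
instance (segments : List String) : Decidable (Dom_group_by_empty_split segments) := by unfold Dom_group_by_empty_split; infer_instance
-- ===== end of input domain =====

-- B replaces A's manual accumulator-and-flush loop by a groupby-style run decomposition (itertools.groupby on the blank/non-blank key, keeping non-blank runs); objective: idiomatic, same O(n) cost.


-- ===== PORT A =====
-- A's loop body: append to current on non-blank, flush current on blank
def pvStepA (st : List (List String) × List String) (seg : String) : List (List String) × List String :=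
  if PySem.Str.strip seg ≠ "" then (st.1, st.2 ++ [seg])
  else if st.2 ≠ [] then (st.1 ++ [st.2], []) else st

-- A's trailing flush after the loop
def pvFinishA (st : List (List String) × List String) : List (List String) :=
  if st.2 ≠ [] then st.1 ++ [st.2] else st.1

def group_by_empty_split (segments : List String) : List (List String) :=
  pvFinishA (segments.foldl pvStepA ([], []))

-- ===== PORT B =====
-- B's key: bool(s.strip())
def pvKeyB (s : String) : Bool := decide (PySem.Str.strip s ≠ "")

-- itertools.groupby: split off the maximal run of equal keys; keep the run iff its key is True
def pvGroupsB : List String → List (List String)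
  | [] => []
  | s :: rest =>
    let k := pvKeyB s
    let run := s :: rest.takeWhile (fun t => pvKeyB t == k)
    let rest' := rest.dropWhile (fun t => pvKeyB t == k)
    if k then run :: pvGroupsB rest' else pvGroupsB rest'
termination_by l => l.length
decreasing_by
  all_goals
    simpa using Nat.lt_succ_of_le (List.length_dropWhile_le _ _)

def group_by_empty_split_alt (segments : List String) : List (List String) :=
  pvGroupsB segments

-- ===== PRECONDITION & SPEC =====
def Spec_group_by_empty_split (segments : List String) (out : List (List String)) : Prop := out = group_by_empty_split_alt segments
instance (segments : List String) (out : List (List String)) : Decidable (Spec_group_by_empty_split segments out) := by unfold Spec_group_by_empty_split; infer_instance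

-- ===== CLAIM (what is proved, stated in full; the proofs are below) =====
def Claim_equal_group_by_empty_split : Prop := ∀ (segments : List String), Dom_group_by_empty_split segments → Spec_group_by_empty_split segments (group_by_empty_split segments)

-- ===== LEMMAS AND PROOFS =====

-- proof-side intermediate: A's loop continuation given pending run `cur`
def pvCont (cur : List String) : List String → List (List String)
  | [] => if cur = [] then [] else [cur]
  | s :: rest =>
    if pvKeyB s then pvCont (cur ++ [s]) rest
    else (if cur = [] then [] else [cur]) ++ pvCont [] rest

theorem pvFoldA_eq (segs : List String) : ∀ (paras : List (List String)) (cur : List String),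
    pvFinishA (segs.foldl pvStepA (paras, cur)) = paras ++ pvCont cur segs := by
  induction segs with
  | nil =>
    intro paras cur
    simp only [List.foldl_nil, pvFinishA, pvCont]
    by_cases h : cur = [] <;> simp [h]
  | cons s rest ih =>
    intro paras cur
    simp only [List.foldl_cons]
    by_cases hk : PySem.Str.strip s = ""
    · have hkb : pvKeyB s = false := by simp [pvKeyB, hk]
      by_cases hc : cur = []
      · have : pvStepA (paras, cur) s = (paras, cur) := by simp [pvStepA, hk, hc]
        rw [this, ih]
        simp [pvCont, hkb, hc]
      · have : pvStepA (paras, cur) s = (paras ++ [cur], []) := by simp [pvStepA, hk, hc]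
        rw [this, ih]
        simp [pvCont, hkb, hc]
    · have hkb : pvKeyB s = true := by simp [pvKeyB, hk]
      have : pvStepA (paras, cur) s = (paras, cur ++ [s]) := by simp [pvStepA, hk]
      rw [this, ih]
      simp [pvCont, hkb]

theorem pvCont_run (rest : List String) : ∀ (cur : List String), cur ≠ [] →
    pvCont cur rest
      = (cur ++ rest.takeWhile (fun t => pvKeyB t == true)) :: pvCont [] (rest.dropWhile (fun t => pvKeyB t == true)) := by
  induction rest with
  | nil => intro cur hc; simp [pvCont, hc]
  | cons s r ih =>
    intro cur hc
    by_cases hk : pvKeyB s = true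
    · rw [show pvCont cur (s :: r) = pvCont (cur ++ [s]) r by simp [pvCont, hk]]
      rw [ih (cur ++ [s]) (by simp)]
      simp [List.takeWhile, List.dropWhile, hk]
    · simp only [Bool.not_eq_true] at hk
      rw [show pvCont cur (s :: r) = [cur] ++ pvCont [] r by simp [pvCont, hk, hc]]
      simp [List.takeWhile, List.dropWhile, hk, pvCont]

theorem pvCont_dropFalse (l : List String) :
    pvCont [] (l.dropWhile (fun t => pvKeyB t == false)) = pvCont [] l := by
  induction l with
  | nil => rfl
  | cons s r ih =>
    by_cases hk : pvKeyB s = true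
    · simp [List.dropWhile, hk]
    · simp only [Bool.not_eq_true] at hk
      rw [show pvCont ([] : List String) (s :: r) = pvCont [] r by simp [pvCont, hk]]
      simpa [List.dropWhile, hk] using ih

theorem pvCont_eq_groups_aux : ∀ (n : ℕ) (l : List String), l.length ≤ n → pvCont [] l = pvGroupsB l := by
  intro n
  induction n with
  | zero =>
    intro l hl
    have : l = [] := List.eq_nil_of_length_eq_zero (Nat.le_zero.mp hl)
    subst this; simp [pvCont, pvGroupsB]
  | succ n ih =>
    intro l hl
    cases l with
    | nil => simp [pvCont, pvGroupsB]
    | cons s rest =>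
      by_cases hk : pvKeyB s = true
      · rw [show pvCont ([] : List String) (s :: rest) = pvCont [s] rest by simp [pvCont, hk]]
        rw [pvCont_run rest [s] (by simp)]
        rw [pvGroupsB, hk]
        simp only [if_true, List.singleton_append, List.cons.injEq, true_and]
        exact ih _ (le_trans (List.length_dropWhile_le _ _) (Nat.le_of_succ_le_succ hl))
      · simp only [Bool.not_eq_true] at hk
        rw [show pvCont ([] : List String) (s :: rest) = pvCont [] rest by simp [pvCont, hk]]
        rw [pvGroupsB, hk]
        simp only [Bool.false_eq_true, if_false]
        rw [← ih (rest.dropWhile (fun t => pvKeyB t == false))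
              (le_trans (List.length_dropWhile_le _ _) (Nat.le_of_succ_le_succ hl))]
        exact (pvCont_dropFalse rest).symm

-- ===== VERDICT (by name: the statement is the Claim_ definition above) =====
theorem group_by_empty_split_spec : Claim_equal_group_by_empty_split := by
  intro segments _
  unfold Spec_group_by_empty_split group_by_empty_split group_by_empty_split_alt
  rw [pvFoldA_eq segments [] []]
  simpa using pvCont_eq_groups_aux segments.length segments le_rfl
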